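-- pv_equiv track=rewrite | github.com/jk-jung/problem-solving | codewars/5kyu/5_The Capturing Rook.py | min_rook_distance
-- ===== SOURCE A (Python) =====
-- def min_rook_distance(a, b):
--     n = len(a)
--     d = [[1 << 30 for i in range(1 << n)] for j in range(n)]
--
--     for i, (x, y) in enumerate(a):
--         dis = abs(x - b[0]) + abs(y - b[1])
--         d[i][1 << i] = dis
--
--     for st in range(1 << n):
--         for p in range(n):
--             if d[p][st] == (1 << 30):
--                 continue
--             for q in range(n):
--                 if st >> q & 1:
--                     continue
--                 nt = st | (1 << q)
--                 dis = abs(a[p][0] - a[q][0]) + abs(a[p][1] - a[q][1])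
--                 d[q][nt] = min(d[q][nt], d[p][st] + dis)
--
--     s = (1 << n) - 1
--     return min(d[i][s] for i in range(n))
-- ===== SOURCE B (Python) =====
-- def min_rook_distance(a, b):
--     n = len(a)
--     memo = {}
--
--     def best(st, last):
--         # min cost of a path from b visiting exactly the rook-set st, ending at rook `last` (bit `last` set in st)
--         key = (st, last)
--         if key in memo:
--             return memo[key]
--         prev = st ^ (1 << last)
--         if prev == 0:
--             res = abs(a[last][0] - b[0]) + abs(a[last][1] - b[1])
--         else:
--             res = min(best(prev, p) + abs(a[p][0] - a[last][0]) + abs(a[p][1] - a[last][1])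
--                       for p in range(n) if prev >> p & 1)
--         memo[key] = res
--         return res
--
--     full = (1 << n) - 1
--     return min(best(full, last) for last in range(n))
-- ===== Notes on version B (the rewrite author's own statement) =====
-- stated objective: alternative
-- what changed: A fills an n x 2^n bottom-up Held-Karp table with a triple loop over all (state, from, to) transitions and an explicit 1<<30 infinity sentinel; B is a top-down recursion best(st, last) on (subset, last rook) memoized in a dict, computing only the subset recurrence itself with no table, no sentinel and no skip logic.
-- outside the precondition, e.g. on min_rook_distance([(0, 0), (1073741829, 0)], (0, 0)): A returns 1073741824, B returns 1073741829; on min_rook_distance([], (0, 0)): A raises ValueError, B raises ValueError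
import Mathlib
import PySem

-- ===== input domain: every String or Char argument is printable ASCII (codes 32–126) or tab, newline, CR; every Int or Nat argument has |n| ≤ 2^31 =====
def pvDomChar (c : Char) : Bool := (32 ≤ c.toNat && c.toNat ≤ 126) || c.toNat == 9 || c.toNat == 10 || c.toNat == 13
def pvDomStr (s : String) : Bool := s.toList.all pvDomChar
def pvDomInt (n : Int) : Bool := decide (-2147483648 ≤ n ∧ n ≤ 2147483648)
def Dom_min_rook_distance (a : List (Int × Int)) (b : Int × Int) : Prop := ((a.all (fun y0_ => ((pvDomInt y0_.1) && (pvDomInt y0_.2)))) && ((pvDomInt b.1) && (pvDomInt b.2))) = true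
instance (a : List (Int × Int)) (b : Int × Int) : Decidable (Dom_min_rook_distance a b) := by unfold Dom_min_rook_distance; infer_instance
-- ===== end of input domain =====

-- B replaces A's forward bottom-up Held-Karp table sweep by a top-down recursion on (subset, last rook)
-- (Python B memoizes it in a dict); same cost class, no speed claim. A raises ValueError on an empty rook
-- list and distorts results once path costs reach its 1 << 30 infinity sentinel: both are outside Pre_.

-- ===== PORT A =====
-- Python's `1 << 30` sentinel and `1 << k` powers are written `2 ^ k`
def pvINF : Int := 2 ^ 30
def pvDist (p q : Int × Int) : Int := |p.1 - q.1| + |p.2 - q.2|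
-- d[i][j] read / write on the list-of-lists table (exact here: every index the loops use is in range)
def tget (d : List (List Int)) (i j : Nat) : Int := (d.getD i []).getD j 0
def tset (d : List (List Int)) (i j : Nat) (v : Int) : List (List Int) := d.set i ((d.getD i []).set j v)

def min_rook_distance (a : List (Int × Int)) (b : Int × Int) : Int :=
  let n := a.length
  let d0 : List (List Int) := List.replicate n (List.replicate (2 ^ n) pvINF)
  -- for i, (x, y) in enumerate(a): d[i][1 << i] = abs(x-b[0]) + abs(y-b[1])   (zipIdx = enumerate with Nat indices)
  let d1 := (a.zipIdx).foldl (fun d xi => tset d xi.2 (2 ^ xi.2) (pvDist xi.1 b)) d0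
  let d2 := (List.range (2 ^ n)).foldl (fun d st =>
    (List.range n).foldl (fun d p =>
      if tget d p st = pvINF then d
      else (List.range n).foldl (fun d q =>
        if (st >>> q) &&& 1 = 1 then d
        else
          let nt := st ||| 2 ^ q
          let dis := pvDist (a.getD p (0, 0)) (a.getD q (0, 0))
          tset d q nt (min (tget d q nt) (tget d p st + dis))) d) d) d1
  (PySem.List.min? ((List.range n).map (fun i => tget d2 i (2 ^ n - 1))) (fun x => x)).getD 0

-- ===== PORT B =====
-- termination fact for bestGo: clearing a set bit decreases the subset
theorem pv_xor_pow_lt (st i : Nat) (h : st.testBit i = true) : st ^^^ 2 ^ i < st := by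
  apply Nat.lt_of_testBit i
  · simp [Nat.testBit_xor, h, Nat.testBit_two_pow_self]
  · exact h
  · intro j hj
    rw [Nat.testBit_xor, Nat.testBit_two_pow_of_ne (Nat.ne_of_lt hj)]
    simp

-- best(st, last) of Source B: min cost of a path from b visiting exactly rook-set st, ending at rook `last`
-- (bit `last` set in st; the Python memo dict only caches values, it never changes them)
def bestGo (a : List (Int × Int)) (b : Int × Int) (n st last : Nat) : Int :=
  if h : st.testBit last then
    let prev := st ^^^ 2 ^ last
    if prev = 0 then pvDist (a.getD last (0, 0)) b
    else
      (PySem.List.min? (((List.range n).filter (fun p => prev.testBit p)).map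
        (fun p => bestGo a b n prev p + pvDist (a.getD p (0, 0)) (a.getD last (0, 0)))) (fun x => x)).getD 0
  else 0   -- never reached: called only with bit `last` set (totality guard)
termination_by st
decreasing_by exact pv_xor_pow_lt st last h

def min_rook_distance_alt (a : List (Int × Int)) (b : Int × Int) : Int :=
  let n := a.length
  (PySem.List.min? ((List.range n).map (fun last => bestGo a b n (2 ^ n - 1) last)) (fun x => x)).getD 0

-- ===== PRECONDITION & SPEC =====
-- Pre_ excludes (1) the empty rook list, where A's min() over an empty generator raises ValueError, and
-- (2) inputs whose coordinates are large enough for a path cost to reach A's 1 << 30 infinity sentinel,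
-- where A's sentinel skip/cap logic returns sentinel-distorted values that are artefacts of its table encoding.
def Pre_min_rook_distance (a : List (Int × Int)) (b : Int × Int) : Prop :=
  a ≠ [] ∧ ∀ p ∈ b :: a, (|p.1| + |p.2|) * (4 * (a.length : Int)) < 2 ^ 30
instance (a : List (Int × Int)) (b : Int × Int) : Decidable (Pre_min_rook_distance a b) := by
  unfold Pre_min_rook_distance; infer_instance

def pvWitness_min_rook_distance : (List (Int × Int)) × (Int × Int) := ([(0, 0), (3, 4)], (1, 1))

def Spec_min_rook_distance (a : List (Int × Int)) (b : Int × Int) (out : Int) : Prop := out = min_rook_distance_alt a b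
instance (a : List (Int × Int)) (b : Int × Int) (out : Int) : Decidable (Spec_min_rook_distance a b out) := by unfold Spec_min_rook_distance; infer_instance

-- ===== CLAIM (what is proved, stated in full; the proofs are below) =====
def Claim_equal_min_rook_distance : Prop := ∀ (a : List (Int × Int)) (b : Int × Int), Dom_min_rook_distance a b → Pre_min_rook_distance a b → Spec_min_rook_distance a b (min_rook_distance a b)

-- ===== LEMMAS AND PROOFS =====

-- ---- table cell get/set facts ----
theorem pv_getD_set_row_self (d : List (List Int)) (i : Nat) (r : List Int) (hi : i < d.length) :
    (d.set i r).getD i [] = r := by simp [List.getD, List.getElem?_set_self, hi]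

theorem pv_getD_set_row_ne (d : List (List Int)) (i i' : Nat) (r : List Int) (h : i ≠ i') :
    (d.set i r).getD i' [] = d.getD i' [] := by simp [List.getD, List.getElem?_set_ne h]

theorem pv_getD_set_el_self (r : List Int) (j : Nat) (v : Int) (hj : j < r.length) :
    (r.set j v).getD j 0 = v := by simp [List.getD, List.getElem?_set_self, hj]

theorem pv_getD_set_el_ne (r : List Int) (j j' : Nat) (v : Int) (h : j ≠ j') :
    (r.set j v).getD j' 0 = r.getD j' 0 := by simp [List.getD, List.getElem?_set_ne h]

theorem tget_tset_self (d : List (List Int)) (i j : Nat) (v : Int)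
    (hi : i < d.length) (hj : j < (d.getD i []).length) : tget (tset d i j v) i j = v := by
  simp only [tget, tset]
  rw [pv_getD_set_row_self d i _ hi, pv_getD_set_el_self _ _ _ hj]

theorem tget_tset_ne (d : List (List Int)) (i j i' j' : Nat) (v : Int)
    (h : i ≠ i' ∨ j ≠ j') : tget (tset d i j v) i' j' = tget d i' j' := by
  simp only [tget, tset]
  rcases h with h | h
  · rw [pv_getD_set_row_ne d i i' _ h]
  · by_cases hii : i = i'
    · subst hii
      by_cases hir : i < d.length
      · rw [pv_getD_set_row_self d i _ hir, pv_getD_set_el_ne _ _ _ _ h]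
      · rw [List.set_eq_of_length_le (by omega)]
    · rw [pv_getD_set_row_ne d i i' _ hii]

def pvShape (n N : Nat) (d : List (List Int)) : Prop :=
  d.length = n ∧ ∀ i < n, (d.getD i []).length = N

theorem pvShape_tset (n N : Nat) (d : List (List Int)) (i j : Nat) (v : Int)
    (h : pvShape n N d) : pvShape n N (tset d i j v) := by
  obtain ⟨h1, h2⟩ := h
  refine ⟨by simp [tset, h1], fun i' hi' => ?_⟩
  simp only [tset]
  by_cases hii : i = i'
  · subst hii
    by_cases hir : i < d.length
    · rw [pv_getD_set_row_self d i _ hir, List.length_set]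
      exact h2 i hi'
    · rw [List.set_eq_of_length_le (by omega)]
      exact h2 i hi'
  · rw [pv_getD_set_row_ne d i i' _ hii]
    exact h2 i' hi'

-- ---- bit helpers ----
theorem pv_bit_iff (st q : Nat) : ((st >>> q) &&& 1 = 1) ↔ st.testBit q = true := by
  simp [Nat.testBit, Nat.and_one_is_mod]

theorem pv_testBit_lt (t p n : Nat) (ht : t < 2 ^ n) (hp : t.testBit p = true) : p < n := by
  by_contra h
  rw [Nat.testBit_eq_false_of_lt (lt_of_lt_of_le ht (Nat.pow_le_pow_right (by norm_num) (by omega)))] at hp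
  exact absurd hp (by simp)

theorem pv_or_xor (st q : Nat) (h : st.testBit q = false) : (st ||| 2 ^ q) ^^^ 2 ^ q = st := by
  apply Nat.eq_of_testBit_eq; intro j
  by_cases hj : j = q
  · subst hj; simp [Nat.testBit_xor, Nat.testBit_or, h, Nat.testBit_two_pow_self]
  · simp [Nat.testBit_xor, Nat.testBit_or, Nat.testBit_two_pow_of_ne (Ne.symm hj)]

theorem pv_xor_or (m q : Nat) (h : m.testBit q = true) : (m ^^^ 2 ^ q) ||| 2 ^ q = m := by
  apply Nat.eq_of_testBit_eq; intro j
  by_cases hj : j = q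
  · subst hj; simp [Nat.testBit_xor, Nat.testBit_or, h, Nat.testBit_two_pow_self]
  · simp [Nat.testBit_xor, Nat.testBit_or, Nat.testBit_two_pow_of_ne (Ne.symm hj)]

theorem pv_or_pow_testBit (st q : Nat) : (st ||| 2 ^ q).testBit q = true := by
  simp [Nat.testBit_or, Nat.testBit_two_pow_self]

theorem pv_xor_pow_testBit (m q : Nat) (h : m.testBit q = true) : (m ^^^ 2 ^ q).testBit q = false := by
  simp [Nat.testBit_xor, h, Nat.testBit_two_pow_self]

theorem pv_or_ne (t q : Nat) (h : t.testBit q = false) : t ||| 2 ^ q ≠ t := by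
  intro he
  have h2 := pv_or_pow_testBit t q
  rw [he, h] at h2
  exact absurd h2 (by simp)

theorem pv_exists_bit (t n : Nat) (ht : t < 2 ^ n) (h0 : t ≠ 0) :
    ∃ j, j < n ∧ t.testBit j = true := by
  by_contra hcon
  apply h0
  apply Nat.eq_of_testBit_eq
  intro j
  simp only [Nat.zero_testBit]
  cases htb : t.testBit j with
  | false => rfl
  | true => exact absurd ⟨pv_testBit_lt t j n ht htb, htb⟩ (fun hc => hcon ⟨j, hc⟩)

-- ---- coordinate bound ----
def pvK (a : List (Int × Int)) (b : Int × Int) : Int :=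
  ((b :: a).map (fun p => |p.1| + |p.2|)).foldl max 0

theorem pvK_nonneg (a : List (Int × Int)) (b : Int × Int) : 0 ≤ pvK a b :=
  (PySem.List.le_foldl_max _ _).1

theorem pv_mem_le_K (a : List (Int × Int)) (b : Int × Int) (p : Int × Int) (hp : p ∈ b :: a) :
    |p.1| + |p.2| ≤ pvK a b :=
  (PySem.List.le_foldl_max _ _).2 _ (List.mem_map_of_mem hp)

theorem pv_dist_le (a : List (Int × Int)) (b : Int × Int) (p q : Int × Int)
    (hp : p ∈ b :: a) (hq : q ∈ b :: a) : pvDist p q ≤ 2 * pvK a b := by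
  have h1 := pv_mem_le_K a b p hp
  have h2 := pv_mem_le_K a b q hq
  have e1 : |p.1 - q.1| ≤ |p.1| + |q.1| := abs_sub _ _
  have e2 : |p.2 - q.2| ≤ |p.2| + |q.2| := abs_sub _ _
  have := abs_nonneg p.1; have := abs_nonneg p.2
  have := abs_nonneg q.1; have := abs_nonneg q.2
  unfold pvDist; omega

theorem pv_K_mul_lt (a : List (Int × Int)) (b : Int × Int)
    (hPre : ∀ p ∈ b :: a, (|p.1| + |p.2|) * (4 * (a.length : Int)) < 2 ^ 30) :
    pvK a b * (4 * (a.length : Int)) < 2 ^ 30 := by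
  have key : ∀ (l : List Int) (acc : Int), acc * (4 * (a.length : Int)) < 2 ^ 30 →
      (∀ x ∈ l, x * (4 * (a.length : Int)) < 2 ^ 30) →
      (l.foldl max acc) * (4 * (a.length : Int)) < 2 ^ 30 := by
    intro l
    induction l with
    | nil => intro acc h _; exact h
    | cons x t ih =>
      intro acc h hl
      simp only [List.foldl_cons]
      apply ih
      · rcases max_choice acc x with h' | h' <;> rw [h']
        · exact h
        · exact hl x (by simp)
      · intro y hy; exact hl y (by simp [hy])
  apply key
  · norm_num
  · intro x hx
    obtain ⟨p, hp, rfl⟩ := List.mem_map.mp hx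
    exact hPre p hp

theorem pv_getD_mem (a : List (Int × Int)) (i : Nat) (h : i < a.length) : a.getD i (0, 0) ∈ a := by
  rw [List.getD_eq_getElem a _ h]
  exact List.getElem_mem h

-- ---- bit counting ----
def pvBits (n st : Nat) : Nat := ((List.range n).filter (fun j => st.testBit j)).length

theorem pvBits_le (n st : Nat) : pvBits n st ≤ n := by
  have := List.length_filter_le (fun j => st.testBit j) (List.range n)
  simpa [pvBits] using this

theorem pv_countP_flip (q : Nat) (p p' : Nat → Bool) (hpq : p q = true) (hp'q : p' q = false)
    (hag : ∀ x, x ≠ q → p' x = p x) :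
    ∀ (l : List Nat), l.Nodup → q ∈ l → l.countP p' + 1 = l.countP p := by
  intro l
  induction l with
  | nil => intro _ h; simp at h
  | cons x t ih =>
    intro hnd hq
    obtain ⟨hxt, hnd'⟩ := List.nodup_cons.mp hnd
    rcases List.mem_cons.mp hq with hqx | hq'
    · subst hqx
      have he : t.countP p' = t.countP p := by
        apply List.countP_congr
        intro y hy
        rw [hag y (fun h => hxt (h ▸ hy))]
      rw [List.countP_cons, List.countP_cons, he, hpq, hp'q]
      simp
    · have hx : x ≠ q := fun h => hxt (h ▸ hq')
      rw [List.countP_cons, List.countP_cons, hag x hx]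
      have := ih hnd' hq'
      omega

theorem pvBits_pred (n st q : Nat) (hq : q < n) (h : st.testBit q = true) :
    pvBits n (st ^^^ 2 ^ q) + 1 = pvBits n st := by
  unfold pvBits
  rw [← List.countP_eq_length_filter, ← List.countP_eq_length_filter]
  exact pv_countP_flip q _ _ h (pv_xor_pow_testBit st q h)
    (fun x hx => by simp [Nat.testBit_xor, Nat.testBit_two_pow_of_ne (Ne.symm hx)])
    (List.range n) List.nodup_range (List.mem_range.mpr hq)

theorem pvBits_lt (n st q : Nat) (hq : q < n) (h : st.testBit q = false) :
    pvBits n st + 1 ≤ n := by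
  have hlt : pvBits n st < (List.range n).length := by
    apply List.length_filter_lt_length_iff_exists.mpr
    exact ⟨q, List.mem_range.mpr hq, by simp [h]⟩
  simpa using hlt

-- ---- value bound for bestGo ----
theorem bestGo_le (a : List (Int × Int)) (b : Int × Int)
    (st : Nat) (hst : st < 2 ^ a.length) (q : Nat) (hq : st.testBit q = true) :
    bestGo a b a.length st q ≤ (pvBits a.length st : Int) * (2 * pvK a b) := by
  induction st using Nat.strong_induction_on generalizing q with
  | _ st IH =>
  have hqn : q < a.length := pv_testBit_lt st q a.length hst hq
  rw [bestGo, dif_pos hq]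
  by_cases hp0 : st ^^^ 2 ^ q = 0
  · rw [if_pos hp0]
    have h1 : pvDist (a.getD q (0, 0)) b ≤ 2 * pvK a b :=
      pv_dist_le a b _ _ (List.mem_cons_of_mem _ (pv_getD_mem a q hqn)) (List.mem_cons_self)
    have h2 : 1 ≤ (pvBits a.length st : Int) := by
      have hmem : q ∈ (List.range a.length).filter (fun j => st.testBit j) := by
        simp [List.mem_filter, List.mem_range, hqn, hq]
      have := List.length_pos_of_mem hmem
      unfold pvBits; exact_mod_cast this
    have hK : 0 ≤ 2 * pvK a b := by have := pvK_nonneg a b; omega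
    nlinarith
  · rw [if_neg hp0]
    have hlt : st ^^^ 2 ^ q < st := pv_xor_pow_lt st q hq
    have hprevN : st ^^^ 2 ^ q < 2 ^ a.length := lt_trans hlt hst
    set L := ((List.range a.length).filter (fun p => (st ^^^ 2 ^ q).testBit p)).map
        (fun p => bestGo a b a.length (st ^^^ 2 ^ q) p + pvDist (a.getD p (0, 0)) (a.getD q (0, 0))) with hL
    have hLne : L ≠ [] := by
      obtain ⟨j, hj, hbj⟩ := pv_exists_bit (st ^^^ 2 ^ q) a.length hprevN hp0
      apply List.ne_nil_of_mem (a := bestGo a b a.length (st ^^^ 2 ^ q) j + pvDist (a.getD j (0, 0)) (a.getD q (0, 0)))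
      exact List.mem_map_of_mem (List.mem_filter.mpr ⟨List.mem_range.mpr hj, hbj⟩)
    obtain ⟨x, rest, hLx⟩ : ∃ x rest, L = x :: rest := by
      cases hc : L with
      | nil => exact absurd hc hLne
      | cons x rest => exact ⟨x, rest, rfl⟩
    rw [hLx, PySem.List.min?_id_cons]
    simp only [Option.getD_some]
    have hmem : rest.foldl min x ∈ L := by
      rw [hLx]
      rcases PySem.List.foldl_min_mem rest x with h | h
      · rw [h]; exact List.mem_cons_self
      · exact List.mem_cons_of_mem _ h
    rw [hL] at hmem
    obtain ⟨p, hpf, hpv⟩ := List.mem_map.mp hmem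
    rw [← hpv]
    have hpn : p < a.length := List.mem_range.mp (List.mem_filter.mp hpf).1
    have hpb : (st ^^^ 2 ^ q).testBit p = true := by simpa using (List.mem_filter.mp hpf).2
    have h1 := IH (st ^^^ 2 ^ q) hlt hprevN p hpb
    have h2 : pvDist (a.getD p (0, 0)) (a.getD q (0, 0)) ≤ 2 * pvK a b :=
      pv_dist_le a b _ _ (List.mem_cons_of_mem _ (pv_getD_mem a p hpn))
        (List.mem_cons_of_mem _ (pv_getD_mem a q hqn))
    have h3 : pvBits a.length (st ^^^ 2 ^ q) + 1 = pvBits a.length st := pvBits_pred a.length st q hqn hq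
    have h3' : (pvBits a.length (st ^^^ 2 ^ q) : Int) + 1 = (pvBits a.length st : Int) := by exact_mod_cast h3
    have hK : 0 ≤ 2 * pvK a b := by have := pvK_nonneg a b; omega
    nlinarith

theorem pv_n2K_lt (a : List (Int × Int)) (b : Int × Int)
    (hPre : ∀ p ∈ b :: a, (|p.1| + |p.2|) * (4 * (a.length : Int)) < 2 ^ 30) :
    (a.length : Int) * (2 * pvK a b) < pvINF := by
  have h := pv_K_mul_lt a b hPre
  have hK := pvK_nonneg a b
  have hn : (0 : Int) ≤ (a.length : Int) := by positivity
  unfold pvINF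
  nlinarith

theorem bestGo_lt_INF (a : List (Int × Int)) (b : Int × Int)
    (hPre : ∀ p ∈ b :: a, (|p.1| + |p.2|) * (4 * (a.length : Int)) < 2 ^ 30)
    (st : Nat) (hst : st < 2 ^ a.length) (q : Nat) (hq : st.testBit q = true) :
    bestGo a b a.length st q < pvINF := by
  have h1 := bestGo_le a b st hst q hq
  have h2 : (pvBits a.length st : Int) ≤ (a.length : Int) := by exact_mod_cast pvBits_le a.length st
  have hK : 0 ≤ 2 * pvK a b := by have := pvK_nonneg a b; omega
  have h3 := pv_n2K_lt a b hPre
  nlinarith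

theorem pv_cand_le (a : List (Int × Int)) (b : Int × Int)
    (hPre : ∀ p ∈ b :: a, (|p.1| + |p.2|) * (4 * (a.length : Int)) < 2 ^ 30)
    (t : Nat) (ht : t < 2 ^ a.length) (p q : Nat) (hp : t.testBit p = true)
    (hq : q < a.length) (hqb : t.testBit q = false) :
    bestGo a b a.length t p + pvDist (a.getD p (0, 0)) (a.getD q (0, 0)) ≤ pvINF := by
  have hpn : p < a.length := pv_testBit_lt t p a.length ht hp
  have h1 := bestGo_le a b t ht p hp
  have h2 : pvDist (a.getD p (0, 0)) (a.getD q (0, 0)) ≤ 2 * pvK a b :=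
    pv_dist_le a b _ _ (List.mem_cons_of_mem _ (pv_getD_mem a p hpn))
      (List.mem_cons_of_mem _ (pv_getD_mem a q hq))
  have h3 : pvBits a.length t + 1 ≤ a.length := pvBits_lt a.length t q hq hqb
  have h3' : (pvBits a.length t : Int) + 1 ≤ (a.length : Int) := by exact_mod_cast h3
  have hK : 0 ≤ 2 * pvK a b := by have := pvK_nonneg a b; omega
  have h4 := pv_n2K_lt a b hPre
  nlinarith

-- ---- generic fold lemmas ----
theorem pv_foldl_if_min (l : List Nat) (c : Nat → Bool) (f : Nat → Int) (x : Int) :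
    l.foldl (fun v p => if c p then min v (f p) else v) x = ((l.filter c).map f).foldl min x := by
  induction l generalizing x with
  | nil => rfl
  | cons y t ih =>
    by_cases h : c y <;> simp [List.filter_cons, h, ih]

theorem pv_foldl_min_INF (l : List Int) (hne : l ≠ []) (hle : ∀ x ∈ l, x ≤ pvINF) :
    l.foldl min pvINF = (PySem.List.min? l (fun x => x)).getD 0 := by
  cases l with
  | nil => exact absurd rfl hne
  | cons x t =>
    rw [PySem.List.min?_id_cons]
    simp only [Option.getD_some, List.foldl_cons]
    rw [min_eq_right (hle x (by simp))]

-- ---- the three loop layers of A ----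
def pvStepQ (a : List (Int × Int)) (st p : Nat) (d : List (List Int)) (q : Nat) : List (List Int) :=
  if (st >>> q) &&& 1 = 1 then d
  else
    let nt := st ||| 2 ^ q
    let dis := pvDist (a.getD p (0, 0)) (a.getD q (0, 0))
    tset d q nt (min (tget d q nt) (tget d p st + dis))

def pvStepP (a : List (Int × Int)) (st : Nat) (d : List (List Int)) (p : Nat) : List (List Int) :=
  if tget d p st = pvINF then d
  else (List.range a.length).foldl (pvStepQ a st p) d

theorem pv_qfold (a : List (Int × Int)) (t p : Nat) (ht : t < 2 ^ a.length)
    (l : List Nat) (hnd : l.Nodup) (hln : ∀ q ∈ l, q < a.length) :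
    ∀ d, pvShape a.length (2 ^ a.length) d →
      pvShape a.length (2 ^ a.length) (l.foldl (pvStepQ a t p) d) ∧
      ∀ q' m', tget (l.foldl (pvStepQ a t p) d) q' m' =
        if q' ∈ l ∧ t.testBit q' = false ∧ m' = t ||| 2 ^ q'
        then min (tget d q' m') (tget d p t + pvDist (a.getD p (0, 0)) (a.getD q' (0, 0)))
        else tget d q' m' := by
  induction l with
  | nil => intro d hS; exact ⟨hS, fun q' m' => by simp⟩
  | cons q l' ih =>
    intro d hS
    have hqn : q < a.length := hln q List.mem_cons_self
    obtain ⟨hqnl', hnd'⟩ := List.nodup_cons.mp hnd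
    have hln' : ∀ x ∈ l', x < a.length := fun x hx => hln x (List.mem_cons_of_mem _ hx)
    simp only [List.foldl_cons]
    by_cases hb : t.testBit q = true
    · have hstep : pvStepQ a t p d q = d := by
        rw [pvStepQ, if_pos ((pv_bit_iff t q).mpr hb)]
      rw [hstep]
      obtain ⟨hS2, hv⟩ := ih hnd' hln' d hS
      refine ⟨hS2, fun q' m' => ?_⟩
      rw [hv q' m']
      apply if_congr ?_ rfl rfl
      constructor
      · rintro ⟨h1, h2⟩; exact ⟨List.mem_cons_of_mem _ h1, h2⟩
      · rintro ⟨h1, h2, h3⟩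
        rcases List.mem_cons.mp h1 with rfl | h1'
        · rw [hb] at h2; exact absurd h2 (by simp)
        · exact ⟨h1', h2, h3⟩
    · have hbf : t.testBit q = false := by simpa using hb
      have hntt : t ||| 2 ^ q ≠ t := pv_or_ne t q hbf
      have hstep : pvStepQ a t p d q =
          tset d q (t ||| 2 ^ q) (min (tget d q (t ||| 2 ^ q))
            (tget d p t + pvDist (a.getD p (0, 0)) (a.getD q (0, 0)))) := by
        rw [pvStepQ, if_neg (by rw [pv_bit_iff, hbf]; simp)]
      rw [hstep]
      have hS' := pvShape_tset a.length (2 ^ a.length) d q (t ||| 2 ^ q)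
        (min (tget d q (t ||| 2 ^ q)) (tget d p t + pvDist (a.getD p (0, 0)) (a.getD q (0, 0)))) hS
      obtain ⟨hS2, hv⟩ := ih hnd' hln' _ hS'
      refine ⟨hS2, fun q' m' => ?_⟩
      rw [hv q' m']
      have hpt : tget (tset d q (t ||| 2 ^ q) (min (tget d q (t ||| 2 ^ q))
            (tget d p t + pvDist (a.getD p (0, 0)) (a.getD q (0, 0))))) p t = tget d p t :=
        tget_tset_ne _ _ _ _ _ _ (Or.inr hntt)
      by_cases hq'q : q' = q
      · subst hq'q
        rw [if_neg (fun h => hqnl' h.1)]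
        by_cases hm : m' = t ||| 2 ^ q'
        · subst hm
          rw [tget_tset_self d q' _ _ (by rw [hS.1]; exact hqn)
            (by rw [hS.2 q' hqn]; exact Nat.or_lt_two_pow ht (Nat.pow_lt_pow_right one_lt_two hqn))]
          rw [if_pos ⟨List.mem_cons_self, hbf, rfl⟩]
        · rw [tget_tset_ne _ _ _ _ _ _ (Or.inr (fun h => hm h.symm)),
            if_neg (fun h => hm h.2.2)]
      · rw [hpt, tget_tset_ne _ _ _ _ _ _ (Or.inl (fun h => hq'q h.symm))]
        apply if_congr ?_ rfl rfl
        simp [List.mem_cons, hq'q]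

theorem pv_pfold (a : List (Int × Int)) (t : Nat) (ht : t < 2 ^ a.length)
    (l : List Nat) :
    ∀ d, pvShape a.length (2 ^ a.length) d →
      pvShape a.length (2 ^ a.length) (l.foldl (pvStepP a t) d) ∧
      ∀ q' m', tget (l.foldl (pvStepP a t) d) q' m' =
        if q' < a.length ∧ t.testBit q' = false ∧ m' = t ||| 2 ^ q'
        then l.foldl (fun v p => if tget d p t = pvINF then v
              else min v (tget d p t + pvDist (a.getD p (0, 0)) (a.getD q' (0, 0)))) (tget d q' m')
        else tget d q' m' := by
  induction l with
  | nil => intro d hS; exact ⟨hS, fun q' m' => by simp⟩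
  | cons p l' ih =>
    intro d hS
    simp only [List.foldl_cons]
    have hstep : pvShape a.length (2 ^ a.length) (pvStepP a t d p) ∧
        ∀ q' m', tget (pvStepP a t d p) q' m' =
          if q' < a.length ∧ t.testBit q' = false ∧ m' = t ||| 2 ^ q'
          then (if tget d p t = pvINF then tget d q' m'
                else min (tget d q' m') (tget d p t + pvDist (a.getD p (0, 0)) (a.getD q' (0, 0))))
          else tget d q' m' := by
      rw [pvStepP]
      by_cases hI : tget d p t = pvINF
      · rw [if_pos hI]
        refine ⟨hS, fun q' m' => ?_⟩
        simp [hI]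
      · rw [if_neg hI]
        obtain ⟨hS2, hv⟩ := pv_qfold a t p ht (List.range a.length) List.nodup_range
          (fun q hq => List.mem_range.mp hq) d hS
        refine ⟨hS2, fun q' m' => ?_⟩
        rw [hv q' m']
        simp [List.mem_range, hI]
    obtain ⟨hS', hv'⟩ := hstep
    obtain ⟨hS2, hv2⟩ := ih (pvStepP a t d p) hS'
    refine ⟨hS2, fun q' m' => ?_⟩
    rw [hv2 q' m']
    have hcolt : ∀ r, tget (pvStepP a t d p) r t = tget d r t := by
      intro r
      rw [hv' r t]
      rw [if_neg (by rintro ⟨_, h2, h3⟩; exact pv_or_ne t r h2 h3.symm)]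
    by_cases hc : q' < a.length ∧ t.testBit q' = false ∧ m' = t ||| 2 ^ q'
    · rw [if_pos hc, if_pos hc, hv' q' m', if_pos hc]
      have hfn : ∀ (x : Int), l'.foldl (fun v p' => if tget (pvStepP a t d p) p' t = pvINF then v
            else min v (tget (pvStepP a t d p) p' t + pvDist (a.getD p' (0, 0)) (a.getD q' (0, 0)))) x =
          l'.foldl (fun v p' => if tget d p' t = pvINF then v
            else min v (tget d p' t + pvDist (a.getD p' (0, 0)) (a.getD q' (0, 0)))) x := by
        intro x
        apply PySem.List.foldl_congr_mem
        intro acc y hy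
        rw [hcolt y]
      rw [hfn]
    · rw [if_neg hc, if_neg hc, hv' q' m', if_neg hc]

-- ---- the invariant ----
def pvFinal (a : List (Int × Int)) (b : Int × Int) (t q m : Nat) : Int :=
  if m.testBit q = true ∧ (m = 2 ^ q ∨ m ^^^ 2 ^ q < t) then bestGo a b a.length m q else pvINF

def pvInv (a : List (Int × Int)) (b : Int × Int) (t : Nat) (d : List (List Int)) : Prop :=
  pvShape a.length (2 ^ a.length) d ∧
  ∀ q, q < a.length → ∀ m, m < 2 ^ a.length → tget d q m = pvFinal a b t q m

theorem pv_step (a : List (Int × Int)) (b : Int × Int)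
    (hPre : ∀ p ∈ b :: a, (|p.1| + |p.2|) * (4 * (a.length : Int)) < 2 ^ 30)
    (t : Nat) (ht : t < 2 ^ a.length) (d : List (List Int)) (h : pvInv a b t d) :
    pvInv a b (t + 1) ((List.range a.length).foldl (pvStepP a t) d) := by
  obtain ⟨hS, hv⟩ := h
  obtain ⟨hS2, hv2⟩ := pv_pfold a t ht (List.range a.length) d hS
  refine ⟨hS2, fun q' hq' m' hm' => ?_⟩
  rw [hv2 q' m']
  by_cases hc : q' < a.length ∧ t.testBit q' = false ∧ m' = t ||| 2 ^ q'
  · rw [if_pos hc]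
    obtain ⟨-, hbq', hm'eq⟩ := hc
    have hmb : m'.testBit q' = true := by rw [hm'eq]; exact pv_or_pow_testBit t q'
    have hmx : m' ^^^ 2 ^ q' = t := by rw [hm'eq]; exact pv_or_xor t q' hbq'
    have htarget : pvFinal a b (t + 1) q' m' = bestGo a b a.length m' q' := by
      simp only [pvFinal]
      rw [if_pos ⟨hmb, Or.inr (by rw [hmx]; exact Nat.lt_succ_self t)⟩]
    rw [htarget]
    have hfold : (List.range a.length).foldl (fun v p => if tget d p t = pvINF then v
          else min v (tget d p t + pvDist (a.getD p (0, 0)) (a.getD q' (0, 0)))) (tget d q' m') =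
        (List.range a.length).foldl (fun v p => if t.testBit p then
          min v (bestGo a b a.length t p + pvDist (a.getD p (0, 0)) (a.getD q' (0, 0))) else v)
          (tget d q' m') := by
      apply PySem.List.foldl_congr_mem
      intro v p hp
      have hpn : p < a.length := List.mem_range.mp hp
      by_cases hb : t.testBit p = true
      · have h1 : tget d p t = bestGo a b a.length t p := by
          rw [hv p hpn t ht]
          simp only [pvFinal]
          rw [if_pos ⟨hb, Or.inr (pv_xor_pow_lt t p hb)⟩]
        have hne : bestGo a b a.length t p ≠ pvINF := ne_of_lt (bestGo_lt_INF a b hPre t ht p hb)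
        rw [h1, if_neg hne, if_pos hb]
      · have hbf : t.testBit p = false := by simpa using hb
        have h1 : tget d p t = pvINF := by
          rw [hv p hpn t ht]
          simp only [pvFinal]
          rw [if_neg (by rintro ⟨hc1, -⟩; rw [hbf] at hc1; exact absurd hc1 (by simp))]
        rw [h1, if_pos rfl, if_neg (by simp [hbf])]
    rw [hfold]
    by_cases ht0 : t = 0
    · subst ht0
      have hm2 : m' = 2 ^ q' := by simpa using hm'eq
      have hold : tget d q' m' = bestGo a b a.length m' q' := by
        rw [hv q' hq' m' hm']
        simp only [pvFinal]
        rw [if_pos ⟨hmb, Or.inl hm2⟩]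
      have hallskip : ∀ (l : List Nat) (x : Int), l.foldl (fun v p => if (0 : Nat).testBit p then
          min v (bestGo a b a.length 0 p + pvDist (a.getD p (0, 0)) (a.getD q' (0, 0))) else v) x = x := by
        intro l
        induction l with
        | nil => intro x; rfl
        | cons y s ihs =>
          intro x
          rw [List.foldl_cons, if_neg (by simp [Nat.zero_testBit])]
          exact ihs x
      rw [hallskip]
      exact hold
    · have hold : tget d q' m' = pvINF := by
        rw [hv q' hq' m' hm']
        simp only [pvFinal]
        rw [if_neg]
        rintro ⟨-, h2 | h2⟩
        · exact ht0 (by rw [← hmx, h2, Nat.xor_self])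
        · omega
      rw [hold]
      rw [pv_foldl_if_min (List.range a.length) (fun p => t.testBit p)
        (fun p => bestGo a b a.length t p + pvDist (a.getD p (0, 0)) (a.getD q' (0, 0))) pvINF]
      have hbg : bestGo a b a.length m' q' =
          (PySem.List.min? (((List.range a.length).filter (fun p => t.testBit p)).map
            (fun p => bestGo a b a.length t p + pvDist (a.getD p (0, 0)) (a.getD q' (0, 0)))) (fun x => x)).getD 0 := by
        rw [bestGo, dif_pos hmb, hmx, if_neg ht0]
      rw [hbg]
      apply pv_foldl_min_INF
      · obtain ⟨j, hj, hbj⟩ := pv_exists_bit t a.length ht ht0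
        apply List.ne_nil_of_mem (a := bestGo a b a.length t j + pvDist (a.getD j (0, 0)) (a.getD q' (0, 0)))
        exact List.mem_map_of_mem (List.mem_filter.mpr ⟨List.mem_range.mpr hj, hbj⟩)
      · intro x hx
        obtain ⟨p, hpf, rfl⟩ := List.mem_map.mp hx
        have hpb : t.testBit p = true := by simpa using (List.mem_filter.mp hpf).2
        exact pv_cand_le a b hPre t ht p q' hpb hq' hbq'
  · rw [if_neg hc, hv q' hq' m' hm']
    simp only [pvFinal]
    by_cases hb : m'.testBit q' = true
    · by_cases hx : m' ^^^ 2 ^ q' = t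
      · exfalso
        apply hc
        refine ⟨hq', ?_, ?_⟩
        · rw [← hx]; exact pv_xor_pow_testBit m' q' hb
        · rw [← hx, pv_xor_or m' q' hb]
      · have hiff : (m' = 2 ^ q' ∨ m' ^^^ 2 ^ q' < t) ↔ (m' = 2 ^ q' ∨ m' ^^^ 2 ^ q' < t + 1) := by
          constructor
          · rintro (h1 | h1); exacts [Or.inl h1, Or.inr (by omega)]
          · rintro (h1 | h1); exacts [Or.inl h1, Or.inr (by omega)]
        rw [if_congr (and_congr_right (fun _ => hiff)) rfl rfl]
    · rw [if_neg (fun h => hb h.1), if_neg (fun h => hb h.1)]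

-- ---- the initialisation fold ----
theorem pv_init_gen (a : List (Int × Int)) (b : Int × Int) :
    ∀ (l : List (Int × Int)) (k : Nat), a.drop k = l →
    ∀ d, pvShape a.length (2 ^ a.length) d →
      pvShape a.length (2 ^ a.length)
        ((l.zipIdx k).foldl (fun d xi => tset d xi.2 (2 ^ xi.2) (pvDist xi.1 b)) d) ∧
      ∀ q m, tget ((l.zipIdx k).foldl (fun d xi => tset d xi.2 (2 ^ xi.2) (pvDist xi.1 b)) d) q m =
        if k ≤ q ∧ q < a.length ∧ m = 2 ^ q then pvDist (a.getD q (0, 0)) b else tget d q m := by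
  intro l
  induction l with
  | nil =>
    intro k hk d hS
    refine ⟨by simpa using hS, fun q m => ?_⟩
    simp only [List.zipIdx_nil, List.foldl_nil]
    have hkn : a.length ≤ k := by
      by_contra hcon
      have h2 := List.drop_eq_getElem_cons (l := a) (show k < a.length by omega)
      rw [hk] at h2
      exact absurd h2.symm (List.cons_ne_nil _ _)
    rw [if_neg (by rintro ⟨h1, h2, -⟩; omega)]
  | cons x l' ih =>
    intro k hk d hS
    have hkn : k < a.length := by
      by_contra hcon
      rw [List.drop_eq_nil_of_le (by omega)] at hk
      exact absurd hk.symm (List.cons_ne_nil _ _)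
    have h2 := List.drop_eq_getElem_cons (l := a) hkn
    rw [hk] at h2
    injection h2 with hx hl'
    simp only [List.zipIdx_cons, List.foldl_cons]
    obtain ⟨hS2, hv⟩ := ih (k + 1) hl'.symm (tset d k (2 ^ k) (pvDist x b))
      (pvShape_tset _ _ _ _ _ _ hS)
    refine ⟨hS2, fun q m => ?_⟩
    rw [hv q m]
    by_cases hq1 : k + 1 ≤ q ∧ q < a.length ∧ m = 2 ^ q
    · rw [if_pos hq1, if_pos ⟨by omega, hq1.2⟩]
    · rw [if_neg hq1]
      by_cases hq2 : k ≤ q ∧ q < a.length ∧ m = 2 ^ q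
      · obtain ⟨hka, hqa, hma⟩ := hq2
        have hqk : q = k := by
          by_contra hne
          exact hq1 ⟨by omega, hqa, hma⟩
        subst hqk
        rw [if_pos ⟨hka, hqa, hma⟩, hma]
        rw [tget_tset_self d q _ _ (by rw [hS.1]; exact hkn)
          (by rw [hS.2 q hkn]; exact Nat.pow_lt_pow_right one_lt_two hkn)]
        rw [List.getD_eq_getElem a _ hkn, ← hx]
      · rw [if_neg hq2]
        by_cases hqk : q = k
        · subst hqk
          exact tget_tset_ne _ _ _ _ _ _ (Or.inr (fun h => hq2 ⟨le_refl q, hkn, h.symm⟩))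
        · exact tget_tset_ne _ _ _ _ _ _ (Or.inl (fun h => hqk h.symm))

theorem pv_inv_zero (a : List (Int × Int)) (b : Int × Int) :
    pvInv a b 0 ((a.zipIdx).foldl (fun d xi => tset d xi.2 (2 ^ xi.2) (pvDist xi.1 b))
      (List.replicate a.length (List.replicate (2 ^ a.length) pvINF))) := by
  have hS0 : pvShape a.length (2 ^ a.length) (List.replicate a.length (List.replicate (2 ^ a.length) pvINF)) :=
    ⟨by simp, fun i hi => by simp [List.getD, List.getElem?_replicate, hi]⟩
  have h0 : ∀ q m, q < a.length → m < 2 ^ a.length →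
      tget (List.replicate a.length (List.replicate (2 ^ a.length) pvINF)) q m = pvINF := by
    intro q m hq hm
    simp [tget, List.getD, List.getElem?_replicate, hq, hm]
  obtain ⟨hS, hv⟩ := pv_init_gen a b a 0 List.drop_zero _ hS0
  refine ⟨hS, fun q hq m hm => ?_⟩
  rw [hv q m]
  simp only [pvFinal]
  by_cases hc : m = 2 ^ q
  · subst hc
    rw [if_pos ⟨Nat.zero_le q, hq, rfl⟩, if_pos ⟨Nat.testBit_two_pow_self, Or.inl rfl⟩]
    rw [bestGo, dif_pos Nat.testBit_two_pow_self, if_pos (Nat.xor_self _)]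
  · rw [if_neg (fun h => hc h.2.2), h0 q m hq hm,
      if_neg (by
        rintro ⟨h1, h2 | h2⟩
        · exact hc h2
        · omega)]

theorem pv_main (a : List (Int × Int)) (b : Int × Int)
    (hPre : ∀ p ∈ b :: a, (|p.1| + |p.2|) * (4 * (a.length : Int)) < 2 ^ 30) :
    ∀ t, t ≤ 2 ^ a.length →
      pvInv a b t ((List.range t).foldl (fun d st => (List.range a.length).foldl (pvStepP a st) d)
        ((a.zipIdx).foldl (fun d xi => tset d xi.2 (2 ^ xi.2) (pvDist xi.1 b))
          (List.replicate a.length (List.replicate (2 ^ a.length) pvINF)))) := by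
  intro t
  induction t with
  | zero => intro _; simpa using pv_inv_zero a b
  | succ t ih =>
    intro ht
    rw [List.range_succ, List.foldl_append, List.foldl_cons, List.foldl_nil]
    exact pv_step a b hPre t (by omega) _ (ih (by omega))

theorem pv_equal (a : List (Int × Int)) (b : Int × Int)
    (hPre : Pre_min_rook_distance a b) :
    min_rook_distance a b = min_rook_distance_alt a b := by
  obtain ⟨-, hPre2⟩ := hPre
  show (PySem.List.min? ((List.range a.length).map (fun i =>
      tget ((List.range (2 ^ a.length)).foldl (fun d st => (List.range a.length).foldl (pvStepP a st) d)
        ((a.zipIdx).foldl (fun d xi => tset d xi.2 (2 ^ xi.2) (pvDist xi.1 b))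
          (List.replicate a.length (List.replicate (2 ^ a.length) pvINF)))) i (2 ^ a.length - 1)))
      (fun x => x)).getD 0 = min_rook_distance_alt a b
  obtain ⟨hS, hv⟩ := pv_main a b hPre2 (2 ^ a.length) (le_refl _)
  have hpow : 1 ≤ 2 ^ a.length := Nat.one_le_two_pow
  have hmap : (List.range a.length).map (fun i =>
      tget ((List.range (2 ^ a.length)).foldl (fun d st => (List.range a.length).foldl (pvStepP a st) d)
        ((a.zipIdx).foldl (fun d xi => tset d xi.2 (2 ^ xi.2) (pvDist xi.1 b))
          (List.replicate a.length (List.replicate (2 ^ a.length) pvINF)))) i (2 ^ a.length - 1)) =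
      (List.range a.length).map (fun last => bestGo a b a.length (2 ^ a.length - 1) last) := by
    apply List.map_congr_left
    intro i hi
    have hin : i < a.length := List.mem_range.mp hi
    have hb : (2 ^ a.length - 1).testBit i = true := by
      rw [Nat.testBit_two_pow_sub_one]
      simp [hin]
    rw [hv i hin (2 ^ a.length - 1) (by omega)]
    simp only [pvFinal]
    rw [if_pos ⟨hb, Or.inr (lt_of_lt_of_le (pv_xor_pow_lt _ _ hb) (by omega))⟩]
  rw [hmap]
  rfl

-- ===== VERDICT (by name: the statement is the Claim_ definition above) =====
theorem min_rook_distance_spec : Claim_equal_min_rook_distance := by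
  intro a b _ hPre
  unfold Spec_min_rook_distance
  exact pv_equal a b hPre
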